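-- pv_equiv track=rewrite | github.com/BriarDevv/Scouter | scripts/opsctl.py | index_snapshot_ids
-- ===== SOURCE A (Python) =====
-- from typing import Any, Iterable
--
-- def index_snapshot_ids(snapshot: dict[str, Any]) -> dict[str, set[str]]:
--     index: dict[str, set[str]] = {"lead": set(), "draft": set(), "inbound_message": set()}
--
--     for item in snapshot.get("important_replies", []):
--         if item.get("id"):
--             index["inbound_message"].add(item["id"])
--         if item.get("lead_id"):
--             index["lead"].add(item["lead_id"])
--         if item.get("draft_id"):
--             index["draft"].add(item["draft_id"])
--
--     for item in snapshot.get("reviewer_candidates", []):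
--         if item.get("id"):
--             index["inbound_message"].add(item["id"])
--
--     for item in snapshot.get("top_leads", []):
--         if item.get("id"):
--             index["lead"].add(item["id"])
--
--     for item in snapshot.get("drafts_ready", []):
--         if item.get("id"):
--             index["draft"].add(item["id"])
--         if item.get("lead_id"):
--             index["lead"].add(item["lead_id"])
--
--     return index
-- ===== SOURCE B (Python) =====
-- def index_snapshot_ids(snapshot):
--     # Transposed: each category is gathered independently (collect contributing
--     # values in source order, then deduplicate once with set()), instead of one
--     # scatter pass mutating a dict of sets.
--     def gather(specs):
--         vals = []
--         for key, field in specs: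
--             for item in snapshot.get(key, []):
--                 v = item.get(field)
--                 if v:
--                     vals.append(v)
--         return set(vals)
--
--     return {
--         "lead": gather([("important_replies", "lead_id"),
--                         ("top_leads", "id"),
--                         ("drafts_ready", "lead_id")]),
--         "draft": gather([("important_replies", "draft_id"),
--                          ("drafts_ready", "id")]),
--         "inbound_message": gather([("important_replies", "id"),
--                                    ("reviewer_candidates", "id")]),
--     }
-- ===== Notes on version B (the rewrite author's own statement) =====
-- stated objective: alternative
-- what changed: Transposes the computation: instead of one scatter pass over the snapshot sources mutating a dict of sets, B builds each category independently by a gather pass (collect the contributing (source,field) values in order, then deduplicate once with set()), constructing the result dict directly.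
import Mathlib
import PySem

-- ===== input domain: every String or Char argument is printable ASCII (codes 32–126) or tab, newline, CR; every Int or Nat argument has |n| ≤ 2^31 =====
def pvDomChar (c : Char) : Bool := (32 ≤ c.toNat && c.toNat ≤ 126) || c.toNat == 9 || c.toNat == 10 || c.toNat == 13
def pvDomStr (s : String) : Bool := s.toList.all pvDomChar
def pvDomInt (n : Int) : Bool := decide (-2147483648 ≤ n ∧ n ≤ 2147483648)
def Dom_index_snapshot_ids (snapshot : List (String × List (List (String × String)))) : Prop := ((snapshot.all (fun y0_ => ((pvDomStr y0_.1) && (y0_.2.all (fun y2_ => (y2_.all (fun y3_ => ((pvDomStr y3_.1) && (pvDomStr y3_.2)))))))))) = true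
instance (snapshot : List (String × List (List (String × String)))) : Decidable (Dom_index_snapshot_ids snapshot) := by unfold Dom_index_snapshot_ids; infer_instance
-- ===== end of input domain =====

-- B transposes A's single scatter pass (mutable dict of sets) into three independent per-category gather passes (collect values, dedup once); same result, alternative decomposition.


-- ===== PORT A =====
-- the initial index: {"lead": set(), "draft": set(), "inbound_message": set()}
def pvInitIndex : PySem.Dict String (PySem.Set String) :=
  ((PySem.Dict.empty.insert "lead" PySem.Set.empty).insert "draft" PySem.Set.empty).insert
    "inbound_message" PySem.Set.empty

-- 'if item.get(f): index[cat].add(item[f])' — a String value is truthy iff non-empty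
def pvAddField (ix : PySem.Dict String (PySem.Set String)) (item : List (String × String))
    (f cat : String) : PySem.Dict String (PySem.Set String) :=
  match (PySem.Dict.mk item).get? f with
  | some v => if v = "" then ix else ix.modify cat PySem.Set.empty (fun s => PySem.Set.add s v)
  | none => ix

def index_snapshot_ids (snapshot : List (String × List (List (String × String)))) : List (String × List String) :=
  let snap := PySem.Dict.mk snapshot
  let index := pvInitIndex
  let index := (snap.getD "important_replies" []).foldl (fun ix item =>
    let ix := pvAddField ix item "id" "inbound_message"
    let ix := pvAddField ix item "lead_id" "lead"
    pvAddField ix item "draft_id" "draft") index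
  let index := (snap.getD "reviewer_candidates" []).foldl (fun ix item =>
    pvAddField ix item "id" "inbound_message") index
  let index := (snap.getD "top_leads" []).foldl (fun ix item =>
    pvAddField ix item "id" "lead") index
  let index := (snap.getD "drafts_ready" []).foldl (fun ix item =>
    let ix := pvAddField ix item "id" "draft"
    pvAddField ix item "lead_id" "lead") index
  index.items

-- ===== PORT B =====
-- 'vals = []; for key, field in specs: for item in snapshot.get(key, []): v = item.get(field); if v: vals.append(v)'
def pvGather (snap : PySem.Dict String (List (List (String × String))))
    (specs : List (String × String)) : List String :=
  specs.foldl (fun vals kf =>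
    (snap.getD kf.1 []).foldl (fun vals item =>
      match (PySem.Dict.mk item).get? kf.2 with
      | some v => if v = "" then vals else vals ++ [v]
      | none => vals) vals) []

def index_snapshot_ids_alt (snapshot : List (String × List (List (String × String)))) : List (String × List String) :=
  let snap := PySem.Dict.mk snapshot
  [("lead", PySem.Set.ofList (pvGather snap
      [("important_replies", "lead_id"), ("top_leads", "id"), ("drafts_ready", "lead_id")])),
   ("draft", PySem.Set.ofList (pvGather snap
      [("important_replies", "draft_id"), ("drafts_ready", "id")])),
   ("inbound_message", PySem.Set.ofList (pvGather snap
      [("important_replies", "id"), ("reviewer_candidates", "id")]))]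

-- ===== PRECONDITION & SPEC =====
def Spec_index_snapshot_ids (snapshot : List (String × List (List (String × String)))) (out : List (String × List String)) : Prop := out = index_snapshot_ids_alt snapshot
instance (snapshot : List (String × List (List (String × String)))) (out : List (String × List String)) : Decidable (Spec_index_snapshot_ids snapshot out) := by unfold Spec_index_snapshot_ids; infer_instance

-- ===== CLAIM (what is proved, stated in full; the proofs are below) =====
def Claim_equal_index_snapshot_ids : Prop := ∀ (snapshot : List (String × List (List (String × String)))), Dom_index_snapshot_ids snapshot → Spec_index_snapshot_ids snapshot (index_snapshot_ids snapshot)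

-- ===== LEMMAS AND PROOFS =====

-- A's dict state always has exactly the shape lead/draft/inbound_message:
def pvSt (L D M : PySem.Set String) : PySem.Dict String (PySem.Set String) :=
  ((PySem.Dict.empty.insert "lead" L).insert "draft" D).insert "inbound_message" M

-- effect of 'if item.get(f): S.add(item[f])' on one component
def pvAddIf (s : PySem.Set String) (item : List (String × String)) (f : String) : PySem.Set String :=
  match (PySem.Dict.mk item).get? f with
  | some v => if v = "" then s else PySem.Set.add s v
  | none => s

theorem pvAddField_lead (L D M : PySem.Set String) (item : List (String × String)) (f : String) :
    pvAddField (pvSt L D M) item f "lead" = pvSt (pvAddIf L item f) D M := by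
  unfold pvAddField pvAddIf
  cases (PySem.Dict.mk item).get? f with
  | none => rfl
  | some v => by_cases h : v = "" <;> (simp [h]; try rfl)

theorem pvAddField_draft (L D M : PySem.Set String) (item : List (String × String)) (f : String) :
    pvAddField (pvSt L D M) item f "draft" = pvSt L (pvAddIf D item f) M := by
  unfold pvAddField pvAddIf
  cases (PySem.Dict.mk item).get? f with
  | none => rfl
  | some v => by_cases h : v = "" <;> (simp [h]; try rfl)

theorem pvAddField_inbound (L D M : PySem.Set String) (item : List (String × String)) (f : String) :
    pvAddField (pvSt L D M) item f "inbound_message" = pvSt L D (pvAddIf M item f) := by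
  unfold pvAddField pvAddIf
  cases (PySem.Dict.mk item).get? f with
  | none => rfl
  | some v => by_cases h : v = "" <;> (simp [h]; try rfl)

-- the four loops of A, componentwise
theorem pv_loop1 (items : List (List (String × String))) (L D M : PySem.Set String) :
    items.foldl (fun ix item =>
        pvAddField (pvAddField (pvAddField ix item "id" "inbound_message") item "lead_id" "lead")
          item "draft_id" "draft") (pvSt L D M)
      = pvSt (items.foldl (fun s item => pvAddIf s item "lead_id") L)
             (items.foldl (fun s item => pvAddIf s item "draft_id") D)
             (items.foldl (fun s item => pvAddIf s item "id") M) := by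
  induction items generalizing L D M with
  | nil => rfl
  | cons i t ih =>
    simp only [List.foldl_cons, pvAddField_inbound, pvAddField_lead, pvAddField_draft, ih]

theorem pv_loop2 (items : List (List (String × String))) (L D M : PySem.Set String) :
    items.foldl (fun ix item => pvAddField ix item "id" "inbound_message") (pvSt L D M)
      = pvSt L D (items.foldl (fun s item => pvAddIf s item "id") M) := by
  induction items generalizing M with
  | nil => rfl
  | cons i t ih => simp only [List.foldl_cons, pvAddField_inbound, ih]

theorem pv_loop3 (items : List (List (String × String))) (L D M : PySem.Set String) :
    items.foldl (fun ix item => pvAddField ix item "id" "lead") (pvSt L D M)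
      = pvSt (items.foldl (fun s item => pvAddIf s item "id") L) D M := by
  induction items generalizing L with
  | nil => rfl
  | cons i t ih => simp only [List.foldl_cons, pvAddField_lead, ih]

theorem pv_loop4 (items : List (List (String × String))) (L D M : PySem.Set String) :
    items.foldl (fun ix item =>
        pvAddField (pvAddField ix item "id" "draft") item "lead_id" "lead") (pvSt L D M)
      = pvSt (items.foldl (fun s item => pvAddIf s item "lead_id") L)
             (items.foldl (fun s item => pvAddIf s item "id") D) M := by
  induction items generalizing L D with
  | nil => rfl
  | cons i t ih => simp only [List.foldl_cons, pvAddField_draft, pvAddField_lead, ih]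

-- B's inner gather loop, folded into a set, is A's per-component loop
theorem pv_gather_inner (items : List (List (String × String))) (f : String)
    (vals : List String) (s : PySem.Set String) :
    List.foldl PySem.Set.add s
      (items.foldl (fun vals item =>
          match (PySem.Dict.mk item).get? f with
          | some v => if v = "" then vals else vals ++ [v]
          | none => vals) vals)
      = items.foldl (fun t item => pvAddIf t item f) (List.foldl PySem.Set.add s vals) := by
  induction items generalizing vals with
  | nil => rfl
  | cons i t ih =>
    simp only [List.foldl_cons, ih, pvAddIf]
    cases (PySem.Dict.mk i).get? f with
    | none => rfl
    | some v =>
      by_cases h : v = "" <;> simp [h, List.foldl_append, PySem.Set.add]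

-- ===== VERDICT (by name: the statement is the Claim_ definition above) =====
theorem index_snapshot_ids_spec : Claim_equal_index_snapshot_ids := by
  intro snapshot _
  unfold Spec_index_snapshot_ids index_snapshot_ids index_snapshot_ids_alt
  show ((((PySem.Dict.mk snapshot).getD "drafts_ready" []).foldl _
      (((PySem.Dict.mk snapshot).getD "top_leads" []).foldl _
        (((PySem.Dict.mk snapshot).getD "reviewer_candidates" []).foldl _
          (((PySem.Dict.mk snapshot).getD "important_replies" []).foldl _
            (pvSt PySem.Set.empty PySem.Set.empty PySem.Set.empty))))).items) = _
  rw [pv_loop1, pv_loop2, pv_loop3, pv_loop4]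
  simp only [pvGather, List.foldl_cons, List.foldl_nil, PySem.Set.ofList_eq_foldl,
    pv_gather_inner]
  rfl
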